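-- pv_equiv track=rewrite | github.com/UndergroundDetection/MICEMD | src/MicEMD/classification/Ensemble.py | cls_filter
-- ===== SOURCE A (Python) =====
-- from collections import Counter
--
-- def cls_filter(cls_list, diversity_list, rule):
--     c = Counter(cls_list)
--     for k in c:
--         c[k] -= 1
--     for diversity, rule in zip(diversity_list, rule):
--         diversity_sort = sorted(diversity, reverse=rule)
--         for cls, idx in zip(cls_list, diversity):
--             c[cls] += (diversity_sort.index(idx) + 1)
--     return c
-- ===== SOURCE B (Python) =====
-- def cls_filter(cls_list, diversity_list, rule):
--     # Sort-free: an element's 1-based first-occurrence rank in the sorted row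
--     # is 1 + (number of strictly greater elements) when sorting descending,
--     # and 1 + (number of strictly smaller elements) when ascending, so the
--     # rank is obtained by comparison counting and no sorted list is kept.
--     scores = {}
--     for cls in cls_list:
--         scores[cls] = scores.get(cls, -1) + 1
--     for diversity, r in zip(diversity_list, rule):
--         for cls, idx in zip(cls_list, diversity):
--             if r:
--                 scores[cls] += 1 + sum(1 for x in diversity if x > idx)
--             else:
--                 scores[cls] += 1 + sum(1 for x in diversity if x < idx)
--     return scores
-- ===== Notes on version B (the rewrite author's own statement) =====
-- stated objective: simpler
-- what changed: Removes the sort and the repeated list.index scans entirely: each element's rank is computed directly as 1 plus the number of strictly greater (descending) or strictly smaller (ascending) elements in its row, and the count-minus-one table is built in one dict pass instead of Counter plus a decrement loop.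
import Mathlib
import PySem

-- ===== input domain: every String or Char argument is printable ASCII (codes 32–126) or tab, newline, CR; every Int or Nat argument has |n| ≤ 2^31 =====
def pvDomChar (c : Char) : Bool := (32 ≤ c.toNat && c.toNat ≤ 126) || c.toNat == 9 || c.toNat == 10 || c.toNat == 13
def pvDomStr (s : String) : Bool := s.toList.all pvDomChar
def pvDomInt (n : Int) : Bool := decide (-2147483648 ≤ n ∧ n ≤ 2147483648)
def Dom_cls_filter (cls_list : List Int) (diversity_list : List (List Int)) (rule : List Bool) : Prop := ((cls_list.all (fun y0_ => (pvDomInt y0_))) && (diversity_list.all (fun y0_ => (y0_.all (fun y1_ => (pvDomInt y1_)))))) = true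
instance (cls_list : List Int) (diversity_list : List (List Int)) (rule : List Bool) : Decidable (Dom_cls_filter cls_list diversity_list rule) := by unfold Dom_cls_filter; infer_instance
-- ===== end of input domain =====

-- B removes A's sort and repeated list.index scans: ranks are computed by pairwise comparison counting (no sorted list is ever built); same cost class, simpler code.

-- ===== PORT A =====
-- 'diversity_sort.index(idx)' never raises ValueError: idx is drawn from diversity and
-- diversity_sort is a permutation of diversity, so the '.getD 0' arm is unreachable.
def cls_filter (cls_list : List Int) (diversity_list : List (List Int)) (rule : List Bool) : List (Int × Int) :=
  ((diversity_list.zip rule).foldl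
      (fun d dr =>
        let diversity_sort := PySem.List.sorted dr.1 (fun x => x) dr.2
        (cls_list.zip dr.1).foldl
          (fun d ci =>
            d.modify ci.1 0 (fun v => v + (((PySem.List.index? diversity_sort ci.2).getD 0 : Int) + 1)))
          d)
      ((PySem.Dict.counter cls_list).keys.foldl
        (fun d k => d.modify k 0 (fun v => v - 1))
        (PySem.Dict.counter cls_list))).items

-- ===== PORT B =====
-- 'scores[cls] += …' in Source B never raises KeyError (every cls ∈ cls_list is a key after
-- the first pass), so it is ported with an (unreachable) default 0.
def cls_filter_alt (cls_list : List Int) (diversity_list : List (List Int)) (rule : List Bool) : List (Int × Int) :=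
  ((diversity_list.zip rule).foldl
      (fun d dr =>
        (cls_list.zip dr.1).foldl
          (fun d ci =>
            d.modify ci.1 0 (fun w => w +
              (1 + (if dr.2 then (dr.1.countP (fun x => decide (ci.2 < x)) : Int)
                    else (dr.1.countP (fun x => decide (x < ci.2)) : Int)))))
          d)
      (cls_list.foldl (fun d cls => d.insert cls (d.getD cls (-1) + 1)) PySem.Dict.empty)).items

-- ===== PRECONDITION & SPEC =====
def Spec_cls_filter (cls_list : List Int) (diversity_list : List (List Int)) (rule : List Bool) (out : List (Int × Int)) : Prop := out = cls_filter_alt cls_list diversity_list rule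
instance (cls_list : List Int) (diversity_list : List (List Int)) (rule : List Bool) (out : List (Int × Int)) : Decidable (Spec_cls_filter cls_list diversity_list rule out) := by unfold Spec_cls_filter; infer_instance

-- ===== CLAIM (what is proved, stated in full; the proofs are below) =====
def Claim_equal_cls_filter : Prop := ∀ (cls_list : List Int) (diversity_list : List (List Int)) (rule : List Bool), Dom_cls_filter cls_list diversity_list rule → Spec_cls_filter cls_list diversity_list rule (cls_filter cls_list diversity_list rule)

-- ===== LEMMAS AND PROOFS =====

-- First index of v in an ascending-sorted list = number of elements strictly below v.
theorem pv_index_asc (s : List Int) (v : Int) (hv : v ∈ s)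
    (hs : s.Pairwise (fun a b => a ≤ b)) :
    PySem.List.index? s v = some (s.countP (fun x => decide (x < v))) := by
  induction s with
  | nil => cases hv
  | cons a t ih =>
    rcases List.pairwise_cons.mp hs with ⟨h1, h2⟩
    by_cases hav : a = v
    · subst hav
      rw [PySem.List.index?_cons_self]
      have hz : t.countP (fun x => decide (x < a)) = 0 :=
        List.countP_eq_zero.mpr (fun x hx => by simpa using not_lt.mpr (h1 x hx))
      simp [hz]
    · have hvt : v ∈ t := by cases hv with
        | head => exact absurd rfl hav
        | tail _ h => exact h
      rw [PySem.List.index?_cons_of_ne _ hav, ih hvt h2]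
      have hav' : a < v := lt_of_le_of_ne (h1 v hvt) hav
      simp [hav']

-- First index of v in a descending-sorted list = number of elements strictly above v.
theorem pv_index_desc (s : List Int) (v : Int) (hv : v ∈ s)
    (hs : s.Pairwise (fun a b => b ≤ a)) :
    PySem.List.index? s v = some (s.countP (fun x => decide (v < x))) := by
  induction s with
  | nil => cases hv
  | cons a t ih =>
    rcases List.pairwise_cons.mp hs with ⟨h1, h2⟩
    by_cases hav : a = v
    · subst hav
      rw [PySem.List.index?_cons_self]
      have hz : t.countP (fun x => decide (a < x)) = 0 :=
        List.countP_eq_zero.mpr (fun x hx => by simpa using not_lt.mpr (h1 x hx))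
      simp [hz]
    · have hvt : v ∈ t := by cases hv with
        | head => exact absurd rfl hav
        | tail _ h => exact h
      rw [PySem.List.index?_cons_of_ne _ hav, ih hvt h2]
      have hav' : v < a := lt_of_le_of_ne (h1 v hvt) (fun h => hav h.symm)
      simp [hav']

-- A's rank (first index in the sorted row, +1) equals B's comparison count (+1).
theorem pv_rank_count (l : List Int) (r : Bool) (v : Int) (hv : v ∈ l) :
    ((PySem.List.index? (PySem.List.sorted l (fun x => x) r) v).getD 0 : Int) + 1
      = 1 + (if r then (l.countP (fun x => decide (v < x)) : Int)
             else (l.countP (fun x => decide (x < v)) : Int)) := by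
  have hperm := PySem.List.sorted_perm l (fun x => x) r
  have hvs : v ∈ PySem.List.sorted l (fun x => x) r := hperm.mem_iff.mpr hv
  cases r with
  | false =>
    rw [pv_index_asc _ v hvs (PySem.List.sorted_pairwise l (fun x => x))]
    simp [hperm.countP_eq]
    omega
  | true =>
    rw [pv_index_desc _ v hvs (PySem.List.sorted_pairwise_rev l (fun x => x))]
    simp [hperm.countP_eq]
    omega

-- Set.update adds nothing when every element is already present.
theorem pv_update_of_subset (l : List Int) : ∀ (s : PySem.Set Int), (∀ x ∈ l, x ∈ s) →
    PySem.Set.update s l = s := by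
  induction l with
  | nil => intro s _; rfl
  | cons a t ih =>
    intro s h
    have ha : PySem.Set.add s a = s := by
      simp [PySem.Set.add, PySem.Set.contains, h a (List.mem_cons_self)]
    show PySem.Set.update (PySem.Set.add s a) t = s
    rw [ha]
    exact ih s (fun x hx => h x (List.mem_cons_of_mem _ hx))

-- The decrement-every-key loop, over a Nodup key list.
theorem pv_getD_dec (l : List Int) : ∀ (d : PySem.Dict Int Int) (v : Int), l.Nodup →
    (l.foldl (fun d k => d.modify k 0 (fun v => v - 1)) d).getD v 0
      = if v ∈ l then d.getD v 0 - 1 else d.getD v 0 := by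
  induction l with
  | nil => intro d v _; simp
  | cons a t ih =>
    intro d v hnd
    rcases List.nodup_cons.mp hnd with ⟨hat, hT⟩
    rw [List.foldl_cons, ih _ v hT]
    rw [PySem.Dict.getD_modify]
    by_cases hv : v = a
    · subst hv
      simp [hat]
    · simp [hv, List.mem_cons]

-- B's first pass computes count - 1 (relative to default -1).
theorem pv_getD_build (l : List Int) : ∀ (d : PySem.Dict Int Int) (v : Int),
    (l.foldl (fun d cls => d.insert cls (d.getD cls (-1) + 1)) d).getD v (-1)
      = d.getD v (-1) + l.count v := by
  induction l with
  | nil => intro d v; simp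
  | cons a t ih =>
    intro d v
    rw [List.foldl_cons, ih]
    rw [PySem.Dict.getD_insert]
    by_cases hv : v = a
    · subst hv; simp; omega
    · simp [hv, Ne.symm hv]

-- getD is default-independent on contained keys.
theorem pv_getD_indep (d : PySem.Dict Int Int) (v : Int) (h : d.contains v = true)
    (a b : Int) : d.getD v a = d.getD v b := by
  cases hg : d.get? v with
  | none =>
    rw [PySem.Dict.get?_eq_none_iff_contains] at hg
    simp [h] at hg
  | some w =>
    rw [PySem.Dict.getD_eq_get?_getD, PySem.Dict.getD_eq_get?_getD, hg]
    rfl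

-- A's Counter + decrement dict equals B's single-pass dict.
theorem pv_init_eq (cls_list : List Int) :
    (PySem.Dict.counter cls_list).keys.foldl
        (fun d k => d.modify k 0 (fun v => v - 1)) (PySem.Dict.counter cls_list)
      = cls_list.foldl (fun d cls => d.insert cls (d.getD cls (-1) + 1)) PySem.Dict.empty := by
  set dA := (PySem.Dict.counter cls_list).keys.foldl
      (fun d k => d.modify k 0 (fun v => v - 1)) (PySem.Dict.counter cls_list) with hdA
  set dB := cls_list.foldl (fun d cls => d.insert cls (d.getD cls (-1) + 1)) PySem.Dict.empty
    with hdB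
  have hkeysA : dA.keys = PySem.Set.ofList cls_list := by
    rw [hdA, PySem.Dict.keys_foldl_modify, PySem.Dict.keys_counter]
    exact pv_update_of_subset _ _ (fun x hx => hx)
  have hkeysB : dB.keys = PySem.Set.ofList cls_list := by
    rw [hdB, PySem.Dict.keys_foldl_insert]
    rfl
  have hndA : dA.keys.Nodup := by rw [hkeysA]; exact PySem.Set.nodup_ofList _
  have hndB : dB.keys.Nodup := by rw [hkeysB]; exact PySem.Set.nodup_ofList _
  apply PySem.Dict.ext
  rw [PySem.Dict.items_eq_map_keys dA hndA 0, PySem.Dict.items_eq_map_keys dB hndB 0,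
    hkeysA, hkeysB]
  apply List.map_congr_left
  intro k hk
  have hkcls : k ∈ cls_list := (PySem.Set.mem_ofList cls_list k).mp hk
  have hA : dA.getD k 0 = (cls_list.count k : Int) - 1 := by
    rw [hdA, pv_getD_dec _ _ _ (by simp [PySem.Dict.keys_counter, PySem.Set.nodup_ofList])]
    rw [PySem.Dict.keys_counter]
    simp [(PySem.Set.mem_ofList cls_list k).mpr hkcls, PySem.Dict.getD_counter]
  have hBc : dB.contains k = true := by
    rw [PySem.Dict.contains_iff_mem_keys, hkeysB]
    exact hk
  have hB : dB.getD k 0 = (cls_list.count k : Int) - 1 := by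
    rw [pv_getD_indep dB k hBc 0 (-1), hdB, pv_getD_build]
    simp
    omega
  rw [hA, hB]

-- ===== VERDICT (by name: the statement is the Claim_ definition above) =====
theorem cls_filter_spec : Claim_equal_cls_filter := by
  intro cls_list diversity_list rule _
  unfold Spec_cls_filter cls_filter cls_filter_alt
  rw [pv_init_eq]
  congr 1
  apply PySem.List.foldl_congr_mem
  intro d dr _
  apply PySem.List.foldl_congr_mem
  intro d' ci hci
  have hmem : ci.2 ∈ dr.1 := (List.of_mem_zip hci).2
  congr 1
  funext w
  rw [pv_rank_count dr.1 dr.2 ci.2 hmem]
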